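-- pv_equiv track=rewrite | github.com/GeorgeDanicico/Cryptography | lab4/main.py | get_numerical_equivalent
-- ===== SOURCE A (Python) =====
-- def get_numerical_equivalent(group):
--     group_to_encrypt = reversed(group)
--     power = 1
--     s = 0
--     for i in group_to_encrypt:
--         if i == '_':
--             ascii_code = 0
--         else:
--             ascii_code = ord(i) - ord('A') + 1
--         s += ascii_code * power
--         power *= 27
--
--     return s
-- ===== SOURCE B (Python) =====
-- def get_numerical_equivalent(group):
--     s = 0
--     for c in group:
--         s = s * 27 + (0 if c == '_' else ord(c) - ord('A') + 1)
--     return s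
-- ===== Notes on version B (the rewrite author's own statement) =====
-- stated objective: idiomatic
-- what changed: Replaces the reversed-iteration with an explicit power accumulator by Horner's method iterating the string left-to-right with a single accumulator (s = s*27 + digit), dropping reversed() and the power variable.
import Mathlib
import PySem

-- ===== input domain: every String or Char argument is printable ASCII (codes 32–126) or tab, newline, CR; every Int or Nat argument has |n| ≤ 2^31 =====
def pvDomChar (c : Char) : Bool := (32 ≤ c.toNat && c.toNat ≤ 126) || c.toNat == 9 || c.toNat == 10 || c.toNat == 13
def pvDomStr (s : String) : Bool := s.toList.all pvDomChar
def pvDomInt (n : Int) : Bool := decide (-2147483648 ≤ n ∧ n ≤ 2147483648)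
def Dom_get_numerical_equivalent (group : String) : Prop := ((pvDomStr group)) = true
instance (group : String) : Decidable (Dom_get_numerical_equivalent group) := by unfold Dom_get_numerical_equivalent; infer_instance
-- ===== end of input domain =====

-- B replaces A's reversed-iteration with a power accumulator by Horner's method left-to-right (one accumulator, no power variable).

-- ===== PORT A =====
-- digit value of a character: 0 for '_', else ord(c) - ord('A') + 1
def pvDigit (c : Char) : Int := if c = '_' then 0 else (c.toNat : Int) - 65 + 1

-- A: iterate reversed(group), keeping (power, s); s += digit * power; power *= 27
def get_numerical_equivalent (group : String) : Int :=
  (group.toList.reverse.foldl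
    (fun (ps : Int × Int) c => (ps.1 * 27, ps.2 + pvDigit c * ps.1)) (1, 0)).2

-- ===== PORT B =====
-- B: Horner left-to-right: s = s*27 + digit
def get_numerical_equivalent_alt (group : String) : Int :=
  group.toList.foldl (fun s c => s * 27 + pvDigit c) 0

-- ===== PRECONDITION & SPEC =====
def Spec_get_numerical_equivalent (group : String) (out : Int) : Prop := out = get_numerical_equivalent_alt group
instance (group : String) (out : Int) : Decidable (Spec_get_numerical_equivalent group out) := by unfold Spec_get_numerical_equivalent; infer_instance

-- ===== CLAIM (what is proved, stated in full; the proofs are below) =====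
def Claim_equal_get_numerical_equivalent : Prop := ∀ (group : String), Dom_get_numerical_equivalent group → Spec_get_numerical_equivalent group (get_numerical_equivalent group)

-- ===== LEMMAS AND PROOFS =====

-- Horner's fold with an arbitrary initial accumulator
theorem pvHorner_init (l : List Char) (a : Int) :
    l.foldl (fun s c => s * 27 + pvDigit c) a
      = a * 27 ^ l.length + l.foldl (fun s c => s * 27 + pvDigit c) 0 := by
  induction l generalizing a with
  | nil => simp
  | cons c t ih =>
    simp only [List.foldl_cons, List.length_cons]
    rw [ih (a * 27 + pvDigit c), ih (0 * 27 + pvDigit c)]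
    ring

-- A's fold over the reversed list, fully characterised
theorem pvA_fold (l : List Char) (p s : Int) :
    l.reverse.foldl (fun (ps : Int × Int) c => (ps.1 * 27, ps.2 + pvDigit c * ps.1)) (p, s)
      = (p * 27 ^ l.length, s + p * l.foldl (fun s c => s * 27 + pvDigit c) 0) := by
  induction l generalizing p s with
  | nil => simp
  | cons c t ih =>
    simp only [List.reverse_cons, List.foldl_append, List.foldl_cons, List.foldl_nil, ih,
      List.length_cons]
    rw [pvHorner_init t (0 * 27 + pvDigit c)]
    rw [Prod.mk.injEq]
    constructor <;> ring

-- ===== VERDICT (by name: the statement is the Claim_ definition above) =====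
theorem get_numerical_equivalent_spec : Claim_equal_get_numerical_equivalent := by
  intro group _
  unfold Spec_get_numerical_equivalent get_numerical_equivalent get_numerical_equivalent_alt
  rw [pvA_fold]
  ring
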